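-- pv_equiv track=rewrite | github.com/coinfirm/DeFi_Documentation | defiScrap/prepare_data.py | check_if_weird
-- ===== SOURCE A (Python) =====
-- def check_if_weird(address):
--     l = len(address)
--     if l < 38:
--         return True
--
--     charMap = {}
--     weird = False
--     for char in address:
--         if char not in charMap.keys():
--             charMap[char] = 1
--         else:
--             charMap[char] += 1
--
--     for char in charMap:
--         if charMap[char] > 20:
--             weird = True
--
--
--     count = 0
--
--     # Find the maximum repeating
--     # character starting from str[i]
--     for i in range(l):
--
--         cur_count = 1
--         for j in range(i + 1, l):
--
--             if (address[i] != address[j]):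
--                 break
--             cur_count += 1
--
--         # Update result if required
--         if cur_count > count :
--             count = cur_count
--
--
--     if count > 5 or weird == True:
--         return True
--     else:
--         return False
-- ===== SOURCE B (Python) =====
-- def check_if_weird(address):
--     if len(address) < 38:
--         return True
--
--     counts = {}
--     run = 0
--     best = 0
--     prev = None
--     for ch in address:
--         counts[ch] = counts.get(ch, 0) + 1
--         run = run + 1 if prev == ch else 1
--         if run > best:
--             best = run
--         prev = ch
--
--     return best > 5 or any(v > 20 for v in counts.values())
-- ===== Notes on version B (the rewrite author's own statement) =====
-- stated objective: faster
-- what changed: Replaces A's quadratic nested-loop longest-run search (restarting a scan at every index) with a single pass over the string that tracks the current consecutive-run length and the running maximum while counting characters in the same pass.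
import Mathlib
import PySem

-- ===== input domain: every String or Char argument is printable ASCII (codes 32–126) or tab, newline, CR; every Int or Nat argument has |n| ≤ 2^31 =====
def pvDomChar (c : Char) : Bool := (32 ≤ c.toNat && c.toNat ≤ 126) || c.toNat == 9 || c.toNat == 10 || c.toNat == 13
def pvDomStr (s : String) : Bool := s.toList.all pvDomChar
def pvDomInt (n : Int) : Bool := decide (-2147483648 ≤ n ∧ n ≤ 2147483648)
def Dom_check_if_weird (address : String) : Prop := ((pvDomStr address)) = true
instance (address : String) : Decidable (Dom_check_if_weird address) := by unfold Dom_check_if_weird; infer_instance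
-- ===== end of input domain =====

-- B replaces A's quadratic nested-loop longest-run search with a single pass tracking
-- the current run length, its maximum, and the character counts together (objective: faster).

-- ===== PORT A =====

-- inner loop 'for j in range(i+1, l): if address[i] != address[j]: break; cur_count += 1':
-- counts matching chars from index j on, stopping at the first mismatch (the break)
def pvInnerA (cs : List Char) (ci : Char) (j : Nat) : Int :=
  if h : j < cs.length then
    if cs[j] ≠ ci then 0 else 1 + pvInnerA cs ci (j + 1)
  else 0
termination_by cs.length - j

def check_if_weird (address : String) : Bool :=
  let cs := address.toList
  let l := cs.length
  if l < 38 then true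
  else
    let charMap := cs.foldl (fun d c =>
      if !(d.contains c) then d.insert c 1
      else d.insert c (d.getD c 0 + 1)) (PySem.Dict.empty : PySem.Dict Char Int)
    let weird := charMap.keys.foldl (fun w c =>
      if charMap.getD c 0 > 20 then true else w) false
    let count := (List.range l).foldl (fun count i =>
      let cur_count : Int := 1 + pvInnerA cs (cs.getD i ' ') (i + 1)
      if cur_count > count then cur_count else count) 0
    if count > 5 || weird then true else false

-- ===== PORT B =====

-- one pass; loop state = (counts dict, (run, best, prev))
def check_if_weird_alt (address : String) : Bool :=
  let cs := address.toList
  if cs.length < 38 then true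
  else
    let st := cs.foldl (fun (s : PySem.Dict Char Int × Int × Int × Option Char) ch =>
      (s.1.insert ch (s.1.getD ch 0 + 1),
       let run : Int := if s.2.2.2 = some ch then s.2.1 + 1 else 1
       (run, if run > s.2.2.1 then run else s.2.2.1, some ch)))
      ((PySem.Dict.empty : PySem.Dict Char Int), 0, 0, none)
    st.2.2.1 > 5 || st.1.values.any (· > 20)

-- ===== PRECONDITION & SPEC =====
def Spec_check_if_weird (address : String) (out : Bool) : Prop := out = check_if_weird_alt address
instance (address : String) (out : Bool) : Decidable (Spec_check_if_weird address out) := by unfold Spec_check_if_weird; infer_instance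

-- ===== CLAIM (what is proved, stated in full; the proofs are below) =====
def Claim_equal_check_if_weird : Prop := ∀ (address : String), Dom_check_if_weird address → Spec_check_if_weird address (check_if_weird address)

-- ===== LEMMAS AND PROOFS =====

-- length of the run of c at the head of a list
def pvRunLen (c : Char) : List Char → Int
  | [] => 0
  | x :: t => if x = c then 1 + pvRunLen c t else 0

-- longest run of equal consecutive chars
def pvMaxRun : List Char → Int
  | [] => 0
  | c :: t => max (1 + pvRunLen c t) (pvMaxRun t)

-- B's per-char update of (run, best, prev)
def pvStep (s : Int × Int × Option Char) (ch : Char) : Int × Int × Option Char :=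
  let run : Int := if s.2.2 = some ch then s.1 + 1 else 1
  (run, if run > s.2.1 then run else s.2.1, some ch)

-- maximum run value reached while scanning t with a current run of `run` copies of c
def pvM (run : Int) (c : Char) : List Char → Int
  | [] => run
  | x :: t => if x = c then pvM (run + 1) c t else max run (pvM 1 x t)

theorem pvRunLen_nonneg (c : Char) (t : List Char) : 0 ≤ pvRunLen c t := by
  induction t with
  | nil => simp [pvRunLen]
  | cons x t ih => simp only [pvRunLen]; split <;> omega

theorem pvMaxRun_nonneg (t : List Char) : 0 ≤ pvMaxRun t := by
  induction t with
  | nil => simp [pvMaxRun]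
  | cons x t ih =>
    have := pvRunLen_nonneg x t
    simp only [pvMaxRun]; omega

theorem le_pvM (t : List Char) : ∀ (run : Int) (c : Char), run ≤ pvM run c t := by
  induction t with
  | nil => intro run c; simp [pvM]
  | cons x t ih =>
    intro run c
    simp only [pvM]
    split
    · have := ih (run + 1) c; omega
    · have := ih 1 x; omega

theorem pvM_eq (t : List Char) : ∀ (run : Int) (c : Char), 1 ≤ run →
    pvM run c t = max (run + pvRunLen c t) (pvMaxRun t) := by
  induction t with
  | nil => intro run c h; simp only [pvM, pvRunLen, pvMaxRun]; omega
  | cons x t ih =>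
    intro run c h
    have h2 := pvRunLen_nonneg x t
    have h3 := pvMaxRun_nonneg t
    by_cases hx : x = c
    · subst hx
      have h1 := pvRunLen_nonneg x t
      simp [pvM, pvRunLen, pvMaxRun, ih (run + 1) x (by omega)]
      omega
    · simp only [pvM, pvRunLen, pvMaxRun, if_neg hx, ih 1 x (by omega)]
      omega

theorem pvInnerA_eq (cs : List Char) (ci : Char) (j : Nat) :
    pvInnerA cs ci j = pvRunLen ci (cs.drop j) := by
  rw [pvInnerA]
  split
  · rename_i h
    rw [List.drop_eq_getElem_cons h]
    simp only [pvRunLen]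
    by_cases hx : cs[j] = ci
    · rw [if_neg (by simp [hx]), if_pos hx, pvInnerA_eq cs ci (j + 1)]
    · rw [if_pos (by simp [hx]), if_neg hx]
  · rename_i h
    rw [List.drop_eq_nil_of_le (by omega)]
    simp [pvRunLen]
termination_by cs.length - j

theorem foldl_max_pull (l : List Int) : ∀ (a b : Int),
    l.foldl max (max a b) = max a (l.foldl max b) := by
  induction l with
  | nil => intro a b; simp
  | cons c l ih =>
    intro a b
    simp only [List.foldl_cons]
    rw [max_assoc, ih]

-- generic: the 'if new > acc then new else acc' loop is a running max
theorem pvFoldlIfMax {β : Type} (l : List β) (g : β → Int) : ∀ (a : Int),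
    l.foldl (fun count x => if g x > count then g x else count) a = (l.map g).foldl max a := by
  induction l with
  | nil => intro a; rfl
  | cons x t ih =>
    intro a
    simp only [List.map_cons, List.foldl_cons]
    rw [show (if g x > a then g x else a) = max a (g x) by split <;> omega, ih]

-- A's outer loop computes the longest run
theorem countA_eq (cs : List Char) :
    (List.range cs.length).foldl (fun count i =>
      let cur_count : Int := 1 + pvInnerA cs (cs.getD i ' ') (i + 1)
      if cur_count > count then cur_count else count) 0 = pvMaxRun cs := by
  show (List.range cs.length).foldl (fun count i =>
      if 1 + pvInnerA cs (cs.getD i ' ') (i + 1) > count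
      then 1 + pvInnerA cs (cs.getD i ' ') (i + 1) else count) 0 = pvMaxRun cs
  rw [pvFoldlIfMax (List.range cs.length) (fun i => 1 + pvInnerA cs (cs.getD i ' ') (i + 1)) 0]
  have hg : ∀ (cs : List Char),
      (List.range cs.length).map (fun i => 1 + pvInnerA cs (cs.getD i ' ') (i + 1))
      = (List.range cs.length).map (fun i => 1 + pvRunLen (cs.getD i ' ') (cs.drop (i + 1))) := by
    intro cs; exact List.map_congr_left (fun i _ => by rw [pvInnerA_eq])
  rw [hg]
  induction cs with
  | nil => rfl
  | cons c t ih =>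
    rw [List.length_cons, List.range_succ_eq_map, List.map_cons, List.map_map]
    have hshift : (List.range t.length).map ((fun i => 1 + pvRunLen ((c :: t).getD i ' ') ((c :: t).drop (i + 1))) ∘ Nat.succ)
        = (List.range t.length).map (fun i => 1 + pvRunLen (t.getD i ' ') (t.drop (i + 1))) := by
      exact List.map_congr_left (fun i _ => by simp)
    rw [hshift]
    simp only [List.foldl_cons, List.getD_cons_zero, List.drop_succ_cons, List.drop_zero]
    rw [show max (0 : Int) (1 + pvRunLen c t) = max (1 + pvRunLen c t) 0 by rw [max_comm],
        foldl_max_pull, ih]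
    rfl

theorem scan_best (t : List Char) : ∀ (run best : Int) (c : Char), run ≤ best →
    (t.foldl pvStep (run, best, some c)).2.1 = max best (pvM run c t) := by
  induction t with
  | nil => intro run best c h; simp [pvM]; omega
  | cons x t ih =>
    intro run best c h
    simp only [List.foldl_cons, pvStep, pvM]
    by_cases hx : x = c
    · subst hx
      simp only [if_true]
      have hM := le_pvM t (run + 1) x
      by_cases hb : run + 1 > best
      · rw [if_pos hb, ih (run + 1) (run + 1) x (le_refl _)]; omega
      · rw [if_neg hb]
        have h5 : run + 1 ≤ best := by omega
        rw [ih (run + 1) best x h5]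
    · have hcx : ¬ (some c = some x) := by simpa using fun h' => hx h'.symm
      rw [if_neg hcx, if_neg hx]
      have hM := le_pvM t 1 x
      by_cases hb : (1 : Int) > best
      · rw [if_pos hb, ih 1 1 x (le_refl _)]; omega
      · rw [if_neg hb]
        have h5 : (1 : Int) ≤ best := by omega
        rw [ih 1 best x h5]; omega

-- both per-char dict updates build collections.Counter(cs)
theorem mapA_eq (cs : List Char) :
    cs.foldl (fun d c => if !(d.contains c) then d.insert c 1
      else d.insert c (d.getD c 0 + 1)) (PySem.Dict.empty : PySem.Dict Char Int)
    = PySem.Dict.counter cs := by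
  rw [← PySem.Dict.foldl_insert_getD_add_one_eq_counter]
  apply PySem.List.foldl_congr_mem
  intro d c _
  by_cases hc : d.contains c
  · simp [hc]
  · simp only [Bool.not_eq_true] at hc
    simp [hc, PySem.Dict.getD_of_not_contains d 0 hc]

-- A's 'weird' flag loop is an any
theorem weirdA_eq (keys : List Char) (d : PySem.Dict Char Int) : ∀ (b : Bool),
    keys.foldl (fun w c => if d.getD c 0 > 20 then true else w) b
    = (b || keys.any (fun c => decide (d.getD c 0 > 20))) := by
  induction keys with
  | nil => intro b; simp
  | cons k t ih =>
    intro b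
    simp only [List.foldl_cons, List.any_cons]
    rw [ih]
    by_cases h : d.getD k 0 > 20
    · simp [h]
    · simp [h]

-- B's single loop is its two independent accumulations
theorem foldB_split (cs : List Char) : ∀ (d : PySem.Dict Char Int) (s : Int × Int × Option Char),
    cs.foldl (fun (s : PySem.Dict Char Int × Int × Int × Option Char) ch =>
      (s.1.insert ch (s.1.getD ch 0 + 1),
       let run : Int := if s.2.2.2 = some ch then s.2.1 + 1 else 1
       (run, if run > s.2.2.1 then run else s.2.2.1, some ch))) (d, s)
    = (cs.foldl (fun d ch => d.insert ch (d.getD ch 0 + 1)) d, cs.foldl pvStep s) := by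
  induction cs with
  | nil => intro d s; rfl
  | cons x t ih => intro d s; exact ih _ _

-- B's best over a nonempty list is the longest run
theorem scanB_eq (c : Char) (t : List Char) :
    ((c :: t).foldl pvStep (0, 0, none)).2.1 = pvMaxRun (c :: t) := by
  have h0 : pvStep (0, 0, none) c = (1, 1, some c) := by simp [pvStep]
  rw [List.foldl_cons, h0, scan_best t 1 1 c (le_refl _)]
  have h1 := pvRunLen_nonneg c t
  have h2 := pvMaxRun_nonneg t
  rw [pvM_eq t 1 c (le_refl _)]
  simp only [pvMaxRun]
  omega

theorem pv_main (address : String) : check_if_weird address = check_if_weird_alt address := by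
  unfold check_if_weird check_if_weird_alt
  by_cases hl : address.toList.length < 38
  · rw [if_pos hl, if_pos hl]
  · simp only [if_neg hl]
    obtain ⟨c, t, hcs⟩ : ∃ c t, address.toList = c :: t := by
      cases h : address.toList with
      | nil => rw [h] at hl; simp at hl
      | cons c t => exact ⟨c, t, rfl⟩
    rw [hcs] at *
    rw [foldB_split, mapA_eq, countA_eq, weirdA_eq, scanB_eq,
        PySem.Dict.foldl_insert_getD_add_one_eq_counter]
    simp only [PySem.Dict.values_eq_map_keys _ (PySem.Dict.nodup_keys_counter (c :: t)) 0,
               List.any_map, Function.comp_def, Bool.false_or]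
    split <;> simp_all

-- ===== VERDICT (by name: the statement is the Claim_ definition above) =====
theorem check_if_weird_spec : Claim_equal_check_if_weird := by
  intro address _
  unfold Spec_check_if_weird
  exact pv_main address
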